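-- pv_equiv track=rewrite | github.com/Foundations-of-Applied-Mathematics/Advanced-Programming | 2020_WinterMaterials/ProblemSets/Strings/contacts.py | contacts
-- ===== SOURCE A (Python) =====
-- def contacts(queries):
--     #
--     # Write your code here.
--     #
--     trie = {}
--     def add_word(word, node):
--         ''' Updates trie by adding a word '''
--         if not word:
--             node['count'] = node.get('count', 0) + 1
--             return
--         if word[0] not in node:
--             node[word[0]] = {}
--         node['count'] = node.get('count', 0) + 1
--         add_word(word[1:], node[word[0]])
--
--     def count_words_start_with(substr, node):
--         if not substr:
--             return node.get('count', 0)
--         if substr[0] not in node: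
--             return 0
--         else:
--             return count_words_start_with(substr[1:], node[substr[0]])
--
--     outputs = []
--     for query_type, name in queries:
--         if query_type == 'add':
--             add_word(name, trie)
--         else:
--             outputs.append(count_words_start_with(name, trie))
--
--     return outputs
-- ===== SOURCE B (Python) =====
-- def contacts(queries):
--     # Flat counter keyed by prefix: counter[p] = number of added words having prefix p.
--     counter = {}
--     outputs = []
--     for query_type, name in queries:
--         if query_type == 'add':
--             for i in range(len(name) + 1):
--                 p = name[:i]
--                 counter[p] = counter.get(p, 0) + 1
--         else:
--             outputs.append(counter.get(name, 0))
--     return outputs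
-- ===== Notes on version B (the rewrite author's own statement) =====
-- stated objective: simpler
-- what changed: Replaced the nested dict trie with its two recursive helpers by a single flat dictionary keyed by prefix strings: an 'add' increments the count of every prefix of the name, and a query is one dict lookup.
import Mathlib
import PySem

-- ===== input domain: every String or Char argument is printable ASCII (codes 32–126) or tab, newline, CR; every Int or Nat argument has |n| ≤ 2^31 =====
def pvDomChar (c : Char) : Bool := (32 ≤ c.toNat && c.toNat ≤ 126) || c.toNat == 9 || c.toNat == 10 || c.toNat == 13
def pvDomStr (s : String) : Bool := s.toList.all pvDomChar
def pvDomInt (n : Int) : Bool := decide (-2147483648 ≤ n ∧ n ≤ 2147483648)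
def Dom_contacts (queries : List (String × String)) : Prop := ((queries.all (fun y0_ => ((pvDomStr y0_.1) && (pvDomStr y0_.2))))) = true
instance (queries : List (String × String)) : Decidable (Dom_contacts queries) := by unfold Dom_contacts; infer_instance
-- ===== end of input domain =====

-- B replaces the nested-dict trie and its two recursive helpers with one flat
-- dictionary keyed by prefix strings (objective: simpler; not faster).

-- ===== PORT A =====
-- A's trie node: a Python dict holding an optional 'count' entry plus one sub-dict per
-- first character. Modelled as a mutual inductive (count, association list of children);
-- a child list entry plays the role of a char key of the dict, the Int is the 'count' key
-- (absent 'count' = 0, which is indistinguishable since A only reads it via .get('count', 0)).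
mutual
inductive PTrie where
  | node : Int → PChildren → PTrie
  deriving DecidableEq
inductive PChildren where
  | nil : PChildren
  | cons : Char → PTrie → PChildren → PChildren
  deriving DecidableEq
end

-- dict lookup node.get(ch)
def childGet : PChildren → Char → Option PTrie
  | PChildren.nil, _ => none
  | PChildren.cons c t rest, ch => if c = ch then some t else childGet rest ch

-- dict assignment node[ch] = t (overwrite in place, else append; dict semantics)
def childSet : PChildren → Char → PTrie → PChildren
  | PChildren.nil, ch, t => PChildren.cons ch t PChildren.nil
  | PChildren.cons c t0 rest, ch, t =>
      if c = ch then PChildren.cons c t rest else PChildren.cons c t0 (childSet rest ch t)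

-- def add_word(word, node) — word as its character list
def addWord : List Char → PTrie → PTrie
  | [], PTrie.node c k => PTrie.node (c + 1) k
  | ch :: rest, PTrie.node c k =>
      -- if word[0] not in node: node[word[0]] = {}
      let k1 := match childGet k ch with
        | none => childSet k ch (PTrie.node 0 PChildren.nil)
        | some _ => k
      -- node['count'] = node.get('count', 0) + 1 ; add_word(word[1:], node[word[0]])
      match childGet k1 ch with
      | some sub => PTrie.node (c + 1) (childSet k1 ch (addWord rest sub))
      | none => PTrie.node (c + 1) k1   -- unreachable: ch was just inserted

-- def count_words_start_with(substr, node)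
def countWordsStartWith : List Char → PTrie → Int
  | [], PTrie.node c _ => c
  | ch :: rest, PTrie.node _ k =>
      match childGet k ch with
      | none => 0
      | some sub => countWordsStartWith rest sub

def contacts (queries : List (String × String)) : List Int :=
  (queries.foldl
    (fun (st : PTrie × List Int) q =>
      if q.1 == "add" then (addWord q.2.toList st.1, st.2)
      else (st.1, st.2 ++ [countWordsStartWith q.2.toList st.1]))
    (PTrie.node 0 PChildren.nil, [])).2

-- ===== PORT B =====
-- counter dict keyed by the prefix strings name[:i]; keys are represented by their
-- character lists (string equality agrees with character-list equality).
def bumpPrefixes (w : List Char) (d : PySem.Dict (List Char) Int) : PySem.Dict (List Char) Int :=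
  (List.range (w.length + 1)).foldl
    (fun d i => d.insert (w.take i) (d.getD (w.take i) 0 + 1)) d

def contacts_alt (queries : List (String × String)) : List Int :=
  (queries.foldl
    (fun (st : PySem.Dict (List Char) Int × List Int) q =>
      if q.1 == "add" then (bumpPrefixes q.2.toList st.1, st.2)
      else (st.1, st.2 ++ [st.1.getD q.2.toList 0]))
    (PySem.Dict.empty, [])).2

-- ===== PRECONDITION & SPEC =====
def Spec_contacts (queries : List (String × String)) (out : List Int) : Prop := out = contacts_alt queries
instance (queries : List (String × String)) (out : List Int) : Decidable (Spec_contacts queries out) := by unfold Spec_contacts; infer_instance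

-- ===== CLAIM (what is proved, stated in full; the proofs are below) =====
def Claim_equal_contacts : Prop := ∀ (queries : List (String × String)), Dom_contacts queries → Spec_contacts queries (contacts queries)

-- ===== LEMMAS AND PROOFS =====

theorem childGet_childSet : ∀ (k : PChildren) (c c' : Char) (t : PTrie),
    childGet (childSet k c t) c' = if c = c' then some t else childGet k c'
  | PChildren.nil, c, c', t => by simp [childSet, childGet]
  | PChildren.cons c0 t0 rest, c, c', t => by
      have ih := childGet_childSet rest c c' t
      by_cases h0 : c0 = c
      · subst h0
        by_cases h1 : c0 = c'
        · simp [childSet, childGet, h1]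
        · simp [childSet, childGet, h1]
      · by_cases h1 : c0 = c'
        · subst h1
          simp [childSet, childGet, h0]
          intro h; exact absurd h.symm h0
        · simp [childSet, childGet, h0, h1, ih]

theorem count_empty (s : List Char) : countWordsStartWith s (PTrie.node 0 PChildren.nil) = 0 := by
  cases s with
  | nil => simp [countWordsStartWith]
  | cons c rest => simp [countWordsStartWith, childGet]

-- adding a word bumps exactly the counts of its prefixes
theorem count_addWord (w : List Char) : ∀ (s : List Char) (t : PTrie),
    countWordsStartWith s (addWord w t) =
      countWordsStartWith s t + (if s.isPrefixOf w then 1 else 0) := by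
  induction w with
  | nil =>
      intro s t
      cases t with
      | node c k =>
          cases s with
          | nil => simp [addWord, countWordsStartWith, List.isPrefixOf]
          | cons sc srest => simp [addWord, countWordsStartWith, List.isPrefixOf]
  | cons wc wrest ih =>
      intro s t
      cases t with
      | node c k =>
          cases s with
          | nil =>
              cases hg : childGet k wc <;>
                simp [addWord, hg, childGet_childSet, countWordsStartWith, List.isPrefixOf]
          | cons sc srest =>
              by_cases hc : sc = wc
              · subst hc
                cases hg : childGet k sc with
                | none =>
                    simp [addWord, hg, childGet_childSet, countWordsStartWith,
                          List.isPrefixOf, ih, count_empty]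
                | some sub =>
                    simp [addWord, hg, childGet_childSet, countWordsStartWith,
                          List.isPrefixOf, ih]
              · have hc' : ¬ (wc = sc) := fun h => hc h.symm
                cases hg : childGet k wc with
                | none =>
                    simp [addWord, hg, childGet_childSet, hc', countWordsStartWith,
                          List.isPrefixOf, hc]
                | some sub =>
                    simp [addWord, hg, childGet_childSet, hc', countWordsStartWith,
                          List.isPrefixOf, hc]

-- bumping a Nodup list of keys changes getD by membership
theorem getD_bumpList (keys : List (List Char)) :
    ∀ (d : PySem.Dict (List Char) Int) (s : List Char), keys.Nodup →
    (keys.foldl (fun d p => d.insert p (d.getD p 0 + 1)) d).getD s 0 =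
      d.getD s 0 + (if s ∈ keys then 1 else 0) := by
  induction keys with
  | nil => intro d s _; simp
  | cons p rest ih =>
      intro d s hnd
      have hnd' := hnd.of_cons
      have hp : p ∉ rest := (List.nodup_cons.mp hnd).1
      simp only [List.foldl_cons]
      rw [ih _ s hnd']
      by_cases hs : s = p
      · subst hs
        simp [PySem.Dict.getD_insert_self, hp]
      · rw [PySem.Dict.getD_insert]
        simp [hs]

theorem mem_prefixKeys (w s : List Char) :
    s ∈ (List.range (w.length + 1)).map (fun i => w.take i) ↔ s.isPrefixOf w := by
  simp only [List.mem_map, List.mem_range]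
  constructor
  · rintro ⟨i, _, rfl⟩
    exact List.isPrefixOf_iff_prefix.mpr (List.take_prefix i w)
  · intro h
    have hp := List.isPrefixOf_iff_prefix.mp h
    exact ⟨s.length, by have := hp.length_le; omega, (List.prefix_iff_eq_take.mp hp).symm⟩

theorem getD_bumpPrefixes (w : List Char) (d : PySem.Dict (List Char) Int) (s : List Char) :
    (bumpPrefixes w d).getD s 0 = d.getD s 0 + (if s.isPrefixOf w then 1 else 0) := by
  have hfold : bumpPrefixes w d =
      ((List.range (w.length + 1)).map (fun i => w.take i)).foldl
        (fun d p => d.insert p (d.getD p 0 + 1)) d := by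
    simp [bumpPrefixes, List.foldl_map]
  have hnd : (((List.range (w.length + 1)).map (fun i => w.take i))).Nodup := by
    refine (List.nodup_range).map_on ?_
    intro i hi j hj hij
    have hi' : i ≤ w.length := by simpa using Nat.lt_succ_iff.mp (List.mem_range.mp hi)
    have hj' : j ≤ w.length := by simpa using Nat.lt_succ_iff.mp (List.mem_range.mp hj)
    have : (w.take i).length = (w.take j).length := by rw [hij]
    simpa [List.length_take, Nat.min_eq_left hi', Nat.min_eq_left hj'] using this
  rw [hfold, getD_bumpList _ d s hnd]
  simp only [mem_prefixKeys]

-- main invariant-carrying induction over the query list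
theorem contacts_loop (qs : List (String × String)) :
    ∀ (t : PTrie) (d : PySem.Dict (List Char) Int) (outs : List Int),
    (∀ s : List Char, countWordsStartWith s t = d.getD s 0) →
    (qs.foldl
      (fun (st : PTrie × List Int) q =>
        if q.1 == "add" then (addWord q.2.toList st.1, st.2)
        else (st.1, st.2 ++ [countWordsStartWith q.2.toList st.1])) (t, outs)).2 =
    (qs.foldl
      (fun (st : PySem.Dict (List Char) Int × List Int) q =>
        if q.1 == "add" then (bumpPrefixes q.2.toList st.1, st.2)
        else (st.1, st.2 ++ [st.1.getD q.2.toList 0])) (d, outs)).2 := by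
  induction qs with
  | nil => intro t d outs _; rfl
  | cons q rest ih =>
      intro t d outs hinv
      by_cases hq : q.1 == "add"
      · simp only [List.foldl_cons, hq, if_pos]
        exact ih _ _ _ (fun s => by rw [count_addWord, getD_bumpPrefixes, hinv s])
      · simp only [List.foldl_cons, hq, if_neg, Bool.false_eq_true, not_false_iff]
        rw [hinv q.2.toList]
        exact ih _ _ _ hinv

-- ===== VERDICT (by name: the statement is the Claim_ definition above) =====
theorem contacts_spec : Claim_equal_contacts := by
  intro queries _
  unfold Spec_contacts contacts contacts_alt
  exact contacts_loop queries _ _ [] (fun s => by rw [count_empty]; simp)
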